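-- pv_equiv track=rewrite | github.com/DariuszNewecki/CORE | src/body/services/crawl_service.py | _detect_layer_from_symbol
-- ===== SOURCE A (Python) =====
-- def _detect_layer_from_symbol(symbol: str) -> str:
--     """Detect layer from a dotted symbol/module name."""
--     for prefix, layer in {
--         "mind.": "mind",
--         "body.": "body",
--         "will.": "will",
--         "shared.": "shared",
--     }.items():
--         if symbol.startswith(prefix):
--             return layer
--     return "unknown"
-- ===== SOURCE B (Python) =====
-- def _detect_layer_from_symbol(symbol: str) -> str:
--     """Detect layer from a dotted symbol/module name."""
--     head, sep, _ = symbol.partition(".")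
--     return head if sep and head in ["mind", "body", "will", "shared"] else "unknown"
-- ===== Notes on version B (the rewrite author's own statement) =====
-- stated objective: simpler
-- what changed: Replaces the loop of four dot-terminated startswith tests with a single partition at the first dot followed by one membership test of the head segment (the layer name equals the head, so no mapping is needed).
import Mathlib
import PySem

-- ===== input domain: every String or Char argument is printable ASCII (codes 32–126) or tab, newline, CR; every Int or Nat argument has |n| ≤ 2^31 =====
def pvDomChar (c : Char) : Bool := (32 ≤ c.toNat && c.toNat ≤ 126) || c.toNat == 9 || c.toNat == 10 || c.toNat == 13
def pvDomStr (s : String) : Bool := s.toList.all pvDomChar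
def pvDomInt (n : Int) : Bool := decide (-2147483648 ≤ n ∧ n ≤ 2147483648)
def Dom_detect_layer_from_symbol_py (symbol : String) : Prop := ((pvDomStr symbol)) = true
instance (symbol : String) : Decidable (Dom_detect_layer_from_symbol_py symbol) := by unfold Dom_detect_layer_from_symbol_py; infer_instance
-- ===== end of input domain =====

-- B replaces A's loop of four startswith tests by one partition at the first dot plus a
-- membership test of the head segment (objective: simpler; same asymptotic cost).

-- ===== PORT A =====
-- the dict literal's .items() in insertion order
def pvLayerItems : List (String × String) :=
  [("mind.", "mind"), ("body.", "body"), ("will.", "will"), ("shared.", "shared")]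

-- 'for prefix, layer in {…}.items(): if symbol.startswith(prefix): return layer'
def pvDetectLoop (symbol : String) : List (String × String) → String
  | [] => "unknown"
  | (p, l) :: rest => if PySem.Str.startswith symbol p then l else pvDetectLoop symbol rest

def detect_layer_from_symbol_py (symbol : String) : String :=
  pvDetectLoop symbol pvLayerItems

-- ===== PORT B =====
-- hand port of symbol.partition("."): exact for the one-character separator '.' —
-- returns (text before the first '.', ".", rest) or (symbol, "", "") when there is no '.'
def pvPartitionDot : List Char → List Char × List Char × List Char
  | [] => ([], [], [])
  | c :: rest =>
    if c = '.' then ([], ['.'], rest)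
    else
      let p := pvPartitionDot rest
      (c :: p.1, p.2.1, p.2.2)

def detect_layer_from_symbol_py_alt (symbol : String) : String :=
  let p := pvPartitionDot symbol.toList
  let head := String.ofList p.1
  if p.2.1 ≠ [] ∧ head ∈ (["mind", "body", "will", "shared"] : List String) then head
  else "unknown"

-- ===== PRECONDITION & SPEC =====
def Spec_detect_layer_from_symbol_py (symbol : String) (out : String) : Prop := out = detect_layer_from_symbol_py_alt symbol
instance (symbol : String) (out : String) : Decidable (Spec_detect_layer_from_symbol_py symbol out) := by unfold Spec_detect_layer_from_symbol_py; infer_instance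

-- ===== CLAIM (what is proved, stated in full; the proofs are below) =====
def Claim_equal_detect_layer_from_symbol_py : Prop := ∀ (symbol : String), Dom_detect_layer_from_symbol_py symbol → Spec_detect_layer_from_symbol_py symbol (detect_layer_from_symbol_py symbol)

-- ===== LEMMAS AND PROOFS =====

-- pvPartitionDot either reports "no dot" or splits the list at its FIRST dot.
theorem pvPartitionDot_spec (cs : List Char) :
    (pvPartitionDot cs = (cs, [], []) ∧ '.' ∉ cs) ∨
    (∃ h r, pvPartitionDot cs = (h, ['.'], r) ∧ cs = h ++ '.' :: r ∧ '.' ∉ h) := by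
  induction cs with
  | nil => left; simp [pvPartitionDot]
  | cons c rest ih =>
    by_cases hc : c = '.'
    · right; exact ⟨[], rest, by simp [pvPartitionDot, hc], by simp [hc], by simp⟩
    · rcases ih with ⟨heq, hnd⟩ | ⟨h, r, heq, hsplit, hh⟩
      · left
        constructor
        · simp [pvPartitionDot, hc, heq]
        · simp [hnd, Ne.symm hc]
      · right
        refine ⟨c :: h, r, ?_, by simp [hsplit], ?_⟩
        · simp [pvPartitionDot, hc, heq]
        · simp [hh, Ne.symm hc]

-- a dot-terminated prefix matches exactly when its body is the text before the first dot
theorem pv_prefix_dot_iff (w h r : List Char) (hw : '.' ∉ w) (hh : '.' ∉ h) :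
    (w ++ ['.']) <+: (h ++ '.' :: r) ↔ w = h := by
  induction w generalizing h with
  | nil =>
    cases h with
    | nil => simp
    | cons c h' =>
      simp only [List.nil_append, List.cons_append, List.cons_prefix_cons]
      constructor
      · rintro ⟨rfl, -⟩; exact absurd (List.mem_cons_self ..) hh
      · intro hcontra; simp at hcontra
  | cons a w' ihw =>
    cases h with
    | nil =>
      simp only [List.cons_append, List.nil_append, List.cons_prefix_cons]
      constructor
      · rintro ⟨rfl, -⟩; exact absurd (List.mem_cons_self ..) hw
      · intro hcontra; simp at hcontra
    | cons c h' =>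
      simp only [List.cons_append, List.cons_prefix_cons]
      rw [ihw h' (fun hm => hw (List.mem_cons_of_mem _ hm))
            (fun hm => hh (List.mem_cons_of_mem _ hm))]
      constructor
      · rintro ⟨rfl, rfl⟩; rfl
      · intro hcontra; injection hcontra with h1 h2; exact ⟨h1, h2⟩

-- ===== VERDICT (by name: the statement is the Claim_ definition above) =====
theorem detect_layer_from_symbol_py_spec : Claim_equal_detect_layer_from_symbol_py := by
  intro s _
  unfold Spec_detect_layer_from_symbol_py
  rcases pvPartitionDot_spec s.toList with ⟨heq, hnd⟩ | ⟨h, r, heq, hcs, hh⟩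
  · -- no dot in the symbol: every "…." prefix test fails, and partition reports sep = ""
    have hsw : ∀ p : List Char, '.' ∈ p → PySem.Chars.startswith s.toList p = false :=
      fun p hp => Bool.eq_false_iff.mpr fun htrue =>
        hnd (((PySem.Chars.startswith_iff _ _).mp htrue).subset hp)
    simp [detect_layer_from_symbol_py, pvDetectLoop, pvLayerItems,
      hsw ['m','i','n','d','.'] (by decide), hsw ['b','o','d','y','.'] (by decide),
      hsw ['w','i','l','l','.'] (by decide), hsw ['s','h','a','r','e','d','.'] (by decide),
      detect_layer_from_symbol_py_alt, heq]
  · -- the symbol has a first dot: s.toList = h ++ '.' :: r with '.' ∉ h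
    have sw_iff : ∀ w : String, '.' ∉ w.toList →
        (PySem.Chars.startswith s.toList (w.toList ++ ['.']) = true ↔ w.toList = h) := by
      intro w hw
      rw [PySem.Chars.startswith_iff, hcs]
      exact pv_prefix_dot_iff w.toList h r hw hh
    have hB : detect_layer_from_symbol_py_alt s =
        if String.ofList h ∈ (["mind", "body", "will", "shared"] : List String)
        then String.ofList h else "unknown" := by
      simp [detect_layer_from_symbol_py_alt, heq]
    by_cases h1 : h = "mind".toList
    · have s1 : PySem.Chars.startswith s.toList ['m','i','n','d','.'] = true :=
        (sw_iff "mind" (by decide)).mpr h1.symm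
      rw [hB, h1]
      simp [detect_layer_from_symbol_py, pvDetectLoop, pvLayerItems, s1]
    have s1 : PySem.Chars.startswith s.toList ['m','i','n','d','.'] = false :=
      Bool.eq_false_iff.mpr fun ht => h1 ((sw_iff "mind" (by decide)).mp ht).symm
    by_cases h2 : h = "body".toList
    · have s2 : PySem.Chars.startswith s.toList ['b','o','d','y','.'] = true :=
        (sw_iff "body" (by decide)).mpr h2.symm
      rw [hB, h2]
      simp [detect_layer_from_symbol_py, pvDetectLoop, pvLayerItems, s1, s2]
    have s2 : PySem.Chars.startswith s.toList ['b','o','d','y','.'] = false :=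
      Bool.eq_false_iff.mpr fun ht => h2 ((sw_iff "body" (by decide)).mp ht).symm
    by_cases h3 : h = "will".toList
    · have s3 : PySem.Chars.startswith s.toList ['w','i','l','l','.'] = true :=
        (sw_iff "will" (by decide)).mpr h3.symm
      rw [hB, h3]
      simp [detect_layer_from_symbol_py, pvDetectLoop, pvLayerItems, s1, s2, s3]
    have s3 : PySem.Chars.startswith s.toList ['w','i','l','l','.'] = false :=
      Bool.eq_false_iff.mpr fun ht => h3 ((sw_iff "will" (by decide)).mp ht).symm
    by_cases h4 : h = "shared".toList
    · have s4 : PySem.Chars.startswith s.toList ['s','h','a','r','e','d','.'] = true :=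
        (sw_iff "shared" (by decide)).mpr h4.symm
      rw [hB, h4]
      simp [detect_layer_from_symbol_py, pvDetectLoop, pvLayerItems, s1, s2, s3, s4]
    · have s4 : PySem.Chars.startswith s.toList ['s','h','a','r','e','d','.'] = false :=
        Bool.eq_false_iff.mpr fun ht => h4 ((sw_iff "shared" (by decide)).mp ht).symm
      have hmem : String.ofList h ∉ (["mind", "body", "will", "shared"] : List String) := by
        intro hm
        rcases List.mem_cons.mp hm with he | hm
        · exact h1 (by simpa using congrArg String.toList he)
        rcases List.mem_cons.mp hm with he | hm
        · exact h2 (by simpa using congrArg String.toList he)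
        rcases List.mem_cons.mp hm with he | hm
        · exact h3 (by simpa using congrArg String.toList he)
        rcases List.mem_cons.mp hm with he | hm
        · exact h4 (by simpa using congrArg String.toList he)
        · simp at hm
      rw [hB]
      simp [detect_layer_from_symbol_py, pvDetectLoop, pvLayerItems, s1, s2, s3, s4, hmem]
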